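-- pv_equiv track=rewrite | github.com/Czl100/F5_AIS | draw.py | pro_draw
-- ===== SOURCE A (Python) =====
-- def pro_draw(array):
-- 	coef_set=set(array)
-- 	coef_set=list(coef_set)
-- 	coef_set.sort()
-- 	count_ori=[]
-- 	for i in coef_set:
-- 		count_ori.append(array.count(i))
--
-- 	return coef_set,count_ori
-- ===== SOURCE B (Python) =====
-- def pro_draw(array):
--     s = sorted(array)
--     coef_set = []
--     count_ori = []
--     i = 0
--     n = len(s)
--     while i < n:
--         j = i + 1
--         while j < n and s[j] == s[i]:
--             j += 1
--         coef_set.append(s[i])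
--         count_ori.append(j - i)
--         i = j
--     return coef_set, count_ori
-- ===== Notes on version B (the rewrite author's own statement) =====
-- stated objective: faster
-- what changed: B sorts the whole array once and emits (value, run length) pairs in a single run-length scan, instead of A's per-unique-value rescans of the original array with list.count.
import Mathlib
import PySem

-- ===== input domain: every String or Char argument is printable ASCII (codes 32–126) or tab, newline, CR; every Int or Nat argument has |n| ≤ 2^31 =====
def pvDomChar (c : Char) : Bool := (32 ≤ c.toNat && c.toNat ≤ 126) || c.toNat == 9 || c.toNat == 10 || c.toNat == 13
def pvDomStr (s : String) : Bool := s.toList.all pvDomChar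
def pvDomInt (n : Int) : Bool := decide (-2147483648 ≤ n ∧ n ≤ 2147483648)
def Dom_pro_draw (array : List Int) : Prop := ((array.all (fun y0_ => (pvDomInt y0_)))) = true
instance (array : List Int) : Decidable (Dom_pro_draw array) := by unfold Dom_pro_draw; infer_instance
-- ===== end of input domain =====

-- B: sort once, then one run-length scan, instead of A's per-unique-value rescans with list.count.

-- ===== PORT A =====
def pro_draw (array : List Int) : List Int × List Int :=
  let coef_set := PySem.Set.ofList array
  let coef_set := PySem.List.sorted coef_set (fun x => x) false
  let count_ori := coef_set.foldl (fun acc i => acc ++ [((PySem.List.count array i : Nat) : Int)]) []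
  (coef_set, count_ori)

-- ===== PORT B =====
-- the inner 'while j < n and s[j] == s[i]' scans past the run of s[i]; each outer step emits (s[i], j - i)
def pdGroup : List Int → List Int × List Int
  | [] => ([], [])
  | x :: t =>
    let p := pdGroup (t.dropWhile (fun y => y == x))
    (x :: p.1, (1 + ((t.takeWhile (fun y => y == x)).length : Int)) :: p.2)
termination_by s => s.length
decreasing_by simpa using Nat.lt_succ_of_le (List.length_dropWhile_le _ _)

def pro_draw_alt (array : List Int) : List Int × List Int :=
  pdGroup (PySem.List.sorted array (fun x => x) false)

-- ===== PRECONDITION & SPEC =====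
def Spec_pro_draw (array : List Int) (out : List Int × List Int) : Prop := out = pro_draw_alt array
instance (array : List Int) (out : List Int × List Int) : Decidable (Spec_pro_draw array out) := by unfold Spec_pro_draw; infer_instance

-- ===== CLAIM (what is proved, stated in full; the proofs are below) =====
def Claim_equal_pro_draw : Prop := ∀ (array : List Int), Dom_pro_draw array → Spec_pro_draw array (pro_draw array)

-- ===== LEMMAS AND PROOFS =====

lemma gt_of_mem_dropWhile (x : Int) (t : List Int) (ht : t.Pairwise (· ≤ ·))
    (hx : ∀ v ∈ t, x ≤ v) : ∀ v ∈ t.dropWhile (fun y => y == x), x < v := by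
  induction t with
  | nil => simp
  | cons a t ih =>
    intro v hv
    by_cases h : a = x
    · subst h
      simp only [List.dropWhile_cons, beq_self_eq_true, if_pos] at hv
      exact ih ht.tail (fun w hw => hx w (List.mem_cons_of_mem _ hw)) v hv
    · have hax : x < a := lt_of_le_of_ne (hx a (List.mem_cons_self)) (Ne.symm h)
      simp only [List.dropWhile_cons, beq_iff_eq, h, if_false] at hv
      rcases List.mem_cons.mp hv with rfl | hvt
      · exact hax
      · exact lt_of_lt_of_le hax (List.rel_of_pairwise_cons ht hvt)

lemma pdGroup_spec : ∀ (s : List Int), s.Pairwise (· ≤ ·) →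
    (pdGroup s).1.Pairwise (· < ·) ∧
    (∀ v, v ∈ (pdGroup s).1 ↔ v ∈ s) ∧
    (pdGroup s).2 = (pdGroup s).1.map (fun v => (s.count v : Int)) := by
  intro s
  induction s using pdGroup.induct with
  | case1 => intro _; simp [pdGroup]
  | case2 x t ih =>
    intro hs
    have hsplit : t.takeWhile (fun y => y == x) ++ t.dropWhile (fun y => y == x) = t :=
      List.takeWhile_append_dropWhile
    have hrunx : ∀ v ∈ t.takeWhile (fun y => y == x), v = x := by
      intro v hv
      have hb := List.mem_takeWhile_imp (l := t) (p := fun y => y == x) hv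
      exact beq_iff_eq.mp hb
    have hrestgt : ∀ v ∈ t.dropWhile (fun y => y == x), x < v :=
      gt_of_mem_dropWhile x t hs.tail (fun w hw => List.rel_of_pairwise_cons hs hw)
    have hrestsorted : (t.dropWhile (fun y => y == x)).Pairwise (· ≤ ·) :=
      List.Pairwise.sublist (List.dropWhile_sublist _) hs.tail
    obtain ⟨ih1, ih2, ih3⟩ := ih hrestsorted
    have hcount_run : ∀ v, v ≠ x → (t.takeWhile (fun y => y == x)).count v = 0 := by
      intro v hv
      exact List.count_eq_zero.mpr (fun hmem => hv (hrunx v hmem))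
    have hcount_rest_x : (t.dropWhile (fun y => y == x)).count x = 0 :=
      List.count_eq_zero.mpr (fun hmem => lt_irrefl x (hrestgt x hmem))
    have hcount_run_x : (t.takeWhile (fun y => y == x)).count x =
        (t.takeWhile (fun y => y == x)).length := by
      rw [List.count_eq_length]
      intro v hv; exact (hrunx v hv).symm
    refine ⟨?_, ?_, ?_⟩
    · simp only [pdGroup]
      exact List.pairwise_cons.mpr ⟨fun v hv => hrestgt v ((ih2 v).mp hv), ih1⟩
    · intro v
      simp only [pdGroup, List.mem_cons, ih2]
      constructor
      · rintro (rfl | h)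
        · left; rfl
        · right; rw [← hsplit]; exact List.mem_append_right _ h
      · rintro (rfl | h)
        · left; rfl
        · rw [← hsplit] at h
          rcases List.mem_append.mp h with h | h
          · left; exact hrunx v h
          · right; exact h
    · simp only [pdGroup, List.map_cons, List.count_cons]
      have hheadc : t.count x = (t.takeWhile (fun y => y == x)).length := by
        conv_lhs => rw [← hsplit]
        rw [List.count_append, hcount_run_x, hcount_rest_x]
        omega
      rw [ih3]
      congr 1
      · simp [hheadc]; omega
      · apply List.map_congr_left
        intro v hv
        have hvrest : v ∈ t.dropWhile (fun y => y == x) := (ih2 v).mp hv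
        have hvx : v ≠ x := fun h => lt_irrefl x (h ▸ hrestgt v hvrest)
        have hct : t.count v = (t.dropWhile (fun y => y == x)).count v := by
          conv_lhs => rw [← hsplit]
          rw [List.count_append, hcount_run v hvx]
          omega
        simp [Ne.symm hvx, hct]

-- ===== VERDICT (by name: the statement is the Claim_ definition above) =====
theorem pro_draw_spec : Claim_equal_pro_draw := by
  intro array _
  unfold Spec_pro_draw pro_draw pro_draw_alt
  simp only []
  set s := PySem.List.sorted array (fun x => x) false with hsdef
  have hsp : s.Pairwise (· ≤ ·) := by
    simpa using PySem.List.sorted_pairwise (xs := array) (key := fun x => x)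
  have hperm : s.Perm array := PySem.List.sorted_perm array (fun x => x) false
  obtain ⟨h1, h2, h3⟩ := pdGroup_spec s hsp
  have hnodup : (pdGroup s).1.Nodup := h1.imp ne_of_lt
  have hpermset : (pdGroup s).1.Perm (PySem.Set.ofList array) := by
    rw [List.perm_ext_iff_of_nodup hnodup (PySem.Set.nodup_ofList array)]
    intro v
    rw [h2, PySem.Set.mem_ofList]
    exact hperm.mem_iff
  have hcs : PySem.List.sorted (PySem.Set.ofList array) (fun x => x) false = (pdGroup s).1 :=
    PySem.List.sorted_eq_of_perm_of_pairwise_lt _ _ (fun x => x) hpermset h1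
  have hcount : ∀ v, array.count v = s.count v := fun v => (hperm.count_eq v).symm
  have hfold : ∀ (l : List Int),
      l.foldl (fun acc i => acc ++ [((PySem.List.count array i : Nat) : Int)]) [] =
      l.map (fun v => ((array.count v : Nat) : Int)) := by
    intro l
    simp [PySem.List.count_eq]
    induction l with
    | nil => simp
    | cons a l ihl => simp [ihl]
  rw [hcs, hfold]
  simp only [hcount]
  rw [← h3]
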